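-- pv_equiv track=rewrite | github.com/kirasglimmer/wordsearch | wordsearch.py | contains_set
-- ===== SOURCE A (Python) =====
-- def contains_set(word, set, exclusive):
--     matches = 0
--     for w in word:
--         if set.find(w) < 0:
--             break
--
--         matches += 1
--         if exclusive == False:
--             continue
--
--         set = set.replace(w, '', 1)
--         if len(set) == 0:
--             break
--
--     # only return the word if the number of matches is the same
--     if matches == len(word):
--         return word
-- ===== SOURCE B (Python) =====
-- def contains_set(word, set, exclusive):
--     if exclusive == False:
--         ok = all(w in set for w in word)
--     else:
--         need = {}
--         for w in word:
--             need[w] = need.get(w, 0) + 1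
--         have = {}
--         for c in set:
--             have[c] = have.get(c, 0) + 1
--         ok = all(n <= have.get(w, 0) for w, n in need.items())
--     if ok:
--         return word
-- ===== Notes on version B (the rewrite author's own statement) =====
-- stated objective: faster
-- what changed: A's single stateful scan with break/continue and one-occurrence removal from `set` is replaced by a branch on the mode: an `all` membership test for the non-exclusive mode, and upfront frequency tables (dict tallies) compared for sub-multiset containment in the exclusive mode.
import Mathlib
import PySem

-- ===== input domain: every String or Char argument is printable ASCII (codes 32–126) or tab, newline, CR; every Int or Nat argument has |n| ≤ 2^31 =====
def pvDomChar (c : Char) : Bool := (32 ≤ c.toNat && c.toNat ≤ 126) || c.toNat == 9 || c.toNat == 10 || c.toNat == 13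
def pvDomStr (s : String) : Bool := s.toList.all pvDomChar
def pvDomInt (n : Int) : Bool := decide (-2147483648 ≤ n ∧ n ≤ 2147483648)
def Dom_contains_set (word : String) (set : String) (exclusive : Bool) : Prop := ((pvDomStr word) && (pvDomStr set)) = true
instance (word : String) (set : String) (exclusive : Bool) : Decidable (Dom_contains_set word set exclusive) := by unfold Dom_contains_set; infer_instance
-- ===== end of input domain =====

-- B replaces A's stateful scan (break / one-occurrence removal from `set`) by a branch on the mode:
-- membership `all` for the non-exclusive mode, and upfront frequency tables compared as multisets for
-- the exclusive mode (objective: alternative; return value only — A rebinds `set` locally, no caller-visible mutation).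

-- ===== PORT A =====
-- the for-loop of A: state = (remaining word chars, current set, matches); `break` returns matches
def contains_set_loop : List Char → List Char → Bool → Nat → Nat
  | [], _, _, m => m
  | w :: ws, s, exclusive, m =>
    if PySem.Chars.find s [w] < 0 then m                -- break
    else
      let m := m + 1
      if exclusive == false then contains_set_loop ws s exclusive m   -- continue
      else
        -- set.replace(w, '', 1): `w` is a single char, so this is exactly "erase first occurrence"
        let s := s.erase w
        if s.length = 0 then m                          -- break
        else contains_set_loop ws s exclusive m

def contains_set (word : String) (set : String) (exclusive : Bool) : Option String :=
  let m := contains_set_loop word.toList set.toList exclusive 0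
  if m = word.toList.length then some word else none

-- ===== PORT B =====
-- `d[c] = d.get(c, 0) + 1` over a string (the two tally loops of Source B)
def pvTally (xs : List Char) : PySem.Dict Char Int :=
  xs.foldl (fun d c => d.insert c (d.getD c 0 + 1)) PySem.Dict.empty

def contains_set_alt (word : String) (set : String) (exclusive : Bool) : Option String :=
  let ok :=
    if exclusive == false then
      word.toList.all (fun w => PySem.Chars.isIn [w] set.toList)
    else
      let need := pvTally word.toList
      let haveT := pvTally set.toList
      need.items.all (fun p => decide (p.2 ≤ haveT.getD p.1 0))
  if ok then some word else none

-- ===== PRECONDITION & SPEC =====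
def Spec_contains_set (word : String) (set : String) (exclusive : Bool) (out : Option String) : Prop := out = contains_set_alt word set exclusive
instance (word : String) (set : String) (exclusive : Bool) (out : Option String) : Decidable (Spec_contains_set word set exclusive out) := by unfold Spec_contains_set; infer_instance

-- ===== CLAIM (what is proved, stated in full; the proofs are below) =====
def Claim_equal_contains_set : Prop := ∀ (word : String) (set : String) (exclusive : Bool), Dom_contains_set word set exclusive → Spec_contains_set word set exclusive (contains_set word set exclusive)

-- ===== LEMMAS AND PROOFS =====

theorem pv_infix_singleton (w : Char) (s : List Char) : [w] <:+: s ↔ w ∈ s := by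
  constructor
  · intro h; exact h.mem (by simp)
  · intro h; obtain ⟨l, r, rfl⟩ := List.append_of_mem h; exact ⟨l, r, by simp⟩

-- A's loop in non-exclusive mode completes iff every char of `ws` occurs in `s`
theorem pv_loopF (ws : List Char) (s : List Char) (m : Nat) :
    contains_set_loop ws s false m = m + ws.length ↔ ∀ w ∈ ws, ¬ PySem.Chars.find s [w] < 0 := by
  induction ws generalizing m with
  | nil => simp [contains_set_loop]
  | cons w ws ih =>
    simp only [contains_set_loop]
    by_cases h : PySem.Chars.find s [w] < 0
    · rw [if_pos h]
      simp only [List.length_cons]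
      constructor
      · intro hm; omega
      · intro hall; exact absurd h (hall w (by simp))
    · rw [if_neg h]
      simp only [beq_self_eq_true, if_true, List.length_cons]
      rw [show m + (ws.length + 1) = (m + 1) + ws.length from by omega, ih]
      simp only [List.forall_mem_cons]
      constructor
      · intro hws; exact ⟨h, hws⟩
      · exact fun hh => hh.2

-- A's loop in exclusive mode completes iff word-counts are dominated by set-counts
theorem pv_loopT (ws : List Char) (s : List Char) (m : Nat) :
    contains_set_loop ws s true m = m + ws.length ↔ ∀ c, ws.count c ≤ s.count c := by
  induction ws generalizing s m with
  | nil => simp [contains_set_loop]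
  | cons w ws ih =>
    simp only [contains_set_loop]
    by_cases h : PySem.Chars.find s [w] < 0
    · have hw : w ∉ s := by
        have := (PySem.Chars.find_eq_neg_one_iff s [w]).mp (by
          have := PySem.Chars.neg_one_le_find s [w]; omega)
        rw [pv_infix_singleton] at this; exact this
      rw [if_pos h]
      simp only [List.length_cons]
      constructor
      · intro hm; omega
      · intro hall
        have h1 := hall w
        rw [List.count_eq_zero_of_not_mem hw] at h1
        simp only [List.count_cons, beq_iff_eq, if_true] at h1
        omega
    · have hw : w ∈ s := by
        have h0 : 0 ≤ PySem.Chars.find s [w] := by omega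
        rw [← pv_infix_singleton w s, ← PySem.Chars.find_nonneg_iff]; exact h0
      rw [if_neg h]
      simp only [show (true == false) = false from rfl, Bool.false_eq_true, if_false,
        List.length_cons]
      have hcount : ∀ c, (s.erase w).count c = s.count c - (if w = c then 1 else 0) := by
        intro c; rw [List.count_erase]; simp [beq_iff_eq]
      have hws : 1 ≤ s.count w := List.one_le_count_iff.mpr hw
      by_cases he : (s.erase w).length = 0
      · have hse : s.erase w = [] := List.eq_nil_of_length_eq_zero he
        rw [if_pos he]
        constructor
        · intro hm
          have hws0 : ws = [] := List.eq_nil_of_length_eq_zero (by omega)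
          subst hws0
          intro c
          have h2 := hcount c
          rw [hse] at h2; simp only [List.count_nil] at h2
          simp only [List.count_cons, beq_iff_eq, List.count_nil]
          by_cases hc : w = c
          · rw [if_pos hc] at h2 ⊢; rw [hc] at hws; omega
          · rw [if_neg hc] at h2 ⊢; omega
        · intro hall
          have hws0 : ws = [] := by
            by_contra hne
            obtain ⟨c, hc⟩ := List.exists_mem_of_ne_nil ws hne
            have h1 := hall c
            have h2 := hcount c
            rw [hse] at h2; simp only [List.count_nil] at h2
            have hmem : 1 ≤ ws.count c := List.one_le_count_iff.mpr hc
            simp only [List.count_cons, beq_iff_eq] at h1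
            by_cases hcw : w = c
            · rw [if_pos hcw] at h1 h2; omega
            · rw [if_neg hcw] at h1 h2; omega
          subst hws0; simp
      · rw [if_neg he]
        rw [show m + (ws.length + 1) = (m + 1) + ws.length from by omega, ih]
        constructor
        · intro hall c
          have h1 := hall c
          rw [hcount c] at h1
          simp only [List.count_cons, beq_iff_eq]
          by_cases hc : w = c
          · rw [if_pos hc] at h1 ⊢; rw [hc] at hws; omega
          · rw [if_neg hc] at h1 ⊢; omega
        · intro hall c
          have h1 := hall c
          rw [hcount c]
          simp only [List.count_cons, beq_iff_eq] at h1
          by_cases hc : w = c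
          · rw [if_pos hc] at h1 ⊢; omega
          · rw [if_neg hc] at h1 ⊢; omega

theorem pvTally_eq_counter (xs : List Char) : pvTally xs = PySem.Dict.counter xs := rfl

-- B's items-check is the count-domination condition
theorem pv_ok_iff (word s : List Char) :
    ((pvTally word).items.all (fun p => decide (p.2 ≤ (pvTally s).getD p.1 0)) = true)
      ↔ ∀ c, word.count c ≤ s.count c := by
  rw [pvTally_eq_counter, pvTally_eq_counter, PySem.Dict.items_counter]
  simp only [List.all_map, List.all_eq_true, Function.comp, decide_eq_true_eq,
    PySem.Dict.getD_counter]
  constructor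
  · intro h c
    by_cases hc : c ∈ word
    · have := h c (by rw [PySem.Set.mem_ofList]; exact hc)
      exact_mod_cast this
    · simp [List.count_eq_zero_of_not_mem hc]
  · intro h k _
    exact_mod_cast h k

-- ===== VERDICT (by name: the statement is the Claim_ definition above) =====
theorem contains_set_spec : Claim_equal_contains_set := by
  intro word set exclusive _
  unfold Spec_contains_set contains_set contains_set_alt
  cases exclusive with
  | false =>
    simp only [beq_self_eq_true, if_true]
    by_cases h : contains_set_loop word.toList set.toList false 0 = word.toList.length
    · rw [if_pos h, if_pos]
      rw [List.all_eq_true]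
      intro w hw
      have := (pv_loopF word.toList set.toList 0).mp (by omega) w hw
      rw [PySem.Chars.isIn_iff_infix, pv_infix_singleton]
      have h0 : 0 ≤ PySem.Chars.find set.toList [w] := by omega
      rw [← pv_infix_singleton w set.toList, ← PySem.Chars.find_nonneg_iff]; exact h0
    · rw [if_neg h, if_neg]
      intro hall
      apply h
      have : contains_set_loop word.toList set.toList false 0 = 0 + word.toList.length := by
        rw [pv_loopF]
        intro w hw
        rw [List.all_eq_true] at hall
        have := hall w hw
        rw [PySem.Chars.isIn_iff_infix] at this
        have := (PySem.Chars.find_nonneg_iff set.toList [w]).mpr this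
        omega
      omega
  | true =>
    simp only [show (true == false) = false from rfl, Bool.false_eq_true, if_false]
    by_cases h : ∀ c, word.toList.count c ≤ set.toList.count c
    · rw [if_pos, if_pos]
      · exact (pv_ok_iff word.toList set.toList).mpr h
      · have := (pv_loopT word.toList set.toList 0).mpr h; omega
    · rw [if_neg, if_neg]
      · intro hok; exact h ((pv_ok_iff word.toList set.toList).mp hok)
      · intro hl; exact h ((pv_loopT word.toList set.toList 0).mp (by omega))
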